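-- pv_equiv track=rewrite | github.com/derekhe/msfs2020-google-map | src/server.py | quad_key_to_tile_xy
-- ===== SOURCE A (Python) =====
-- def quad_key_to_tile_xy(quad_key):
--     tile_x = tile_y = 0
--     level_of_detail = len(quad_key)
--     for i in range(level_of_detail, 0, -1):
--         mask = 1 << (i - 1)
--         t = quad_key[level_of_detail - i]
--         if t == '1':
--             tile_x |= mask
--         if t == '2':
--             tile_y |= mask
--         if t == '3':
--             tile_x |= mask
--             tile_y |= mask
--     return tile_x, tile_y, level_of_detail
-- ===== SOURCE B (Python) =====
-- def quad_key_to_tile_xy(quad_key):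
--     # Staged decode: extract each coordinate's bit-string, then parse it as binary.
--     x_bits = ''.join('1' if c in '13' else '0' for c in quad_key)
--     y_bits = ''.join('1' if c in '23' else '0' for c in quad_key)
--     return int('0' + x_bits, 2), int('0' + y_bits, 2), len(quad_key)
-- ===== Notes on version B (the rewrite author's own statement) =====
-- stated objective: alternative
-- what changed: Replaces the reversed index loop with positional masks and OR-accumulation by a staged decomposition: first build each coordinate's binary bit-string (one comprehension each), then parse the two strings with int(bits, 2).
import Mathlib
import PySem

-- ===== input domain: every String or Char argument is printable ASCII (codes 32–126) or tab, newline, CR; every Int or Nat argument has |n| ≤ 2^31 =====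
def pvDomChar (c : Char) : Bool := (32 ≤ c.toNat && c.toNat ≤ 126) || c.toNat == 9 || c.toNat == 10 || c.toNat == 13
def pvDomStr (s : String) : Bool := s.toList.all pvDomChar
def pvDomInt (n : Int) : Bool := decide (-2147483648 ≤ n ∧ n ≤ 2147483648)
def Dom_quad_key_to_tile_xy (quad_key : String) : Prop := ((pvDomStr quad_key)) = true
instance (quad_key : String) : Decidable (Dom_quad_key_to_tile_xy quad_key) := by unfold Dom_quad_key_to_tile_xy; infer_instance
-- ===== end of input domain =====

-- B replaces A's reversed mask-OR loop by a staged decomposition: build each coordinate's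
-- binary bit-string (per-character map), then parse the two strings as binary integers.

-- ===== PORT A =====
-- Loop body of A: mask = 1 << (i-1); t = quad_key[level_of_detail - i]; three independent ifs OR-ing
-- the mask in.  On pyRange n 0 (-1) every i satisfies 1 ≤ i ≤ n, so (i-1).toNat is exact for
-- Python's 1 << (i-1), and the index n-i is always in range (the ' ' default of pyGetD is never hit).
def qkStepA (cs : List Char) (n : Int) (s : Int × Int) (i : Int) : Int × Int :=
  let mask : Int := (1 : Int) <<< (i - 1).toNat
  let t : Char := PySem.List.pyGetD cs (n - i) ' '
  let x1 := if t = '1' then PySem.Int.bor s.1 mask else s.1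
  let y1 := if t = '2' then PySem.Int.bor s.2 mask else s.2
  let x2 := if t = '3' then PySem.Int.bor x1 mask else x1
  let y2 := if t = '3' then PySem.Int.bor y1 mask else y1
  (x2, y2)

def quad_key_to_tile_xy (quad_key : String) : Int × Int × Int :=
  let cs := quad_key.toList
  let level_of_detail : Int := PySem.Str.len quad_key
  let st := (PySem.List.pyRange level_of_detail 0 (-1)).foldl (qkStepA cs level_of_detail) (0, 0)
  (st.1, st.2, level_of_detail)

-- ===== PORT B =====
-- x_bits / y_bits: the per-character comprehensions ('1' if c in '13' else '0', etc.).
def qkBitsX (cs : List Char) : List Char := cs.map (fun c => if c = '1' || c = '3' then '1' else '0')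
def qkBitsY (cs : List Char) : List Char := cs.map (fun c => if c = '2' || c = '3' then '1' else '0')
-- int(s, 2) ported by hand: Horner binary parse; exact on the '0'/'1' strings B feeds it.
def qkParseBin (cs : List Char) : Int := cs.foldl (fun a c => 2 * a + (if c = '1' then 1 else 0)) 0

def quad_key_to_tile_xy_alt (quad_key : String) : Int × Int × Int :=
  (qkParseBin ('0' :: qkBitsX quad_key.toList),
   qkParseBin ('0' :: qkBitsY quad_key.toList),
   PySem.Str.len quad_key)

-- ===== PRECONDITION & SPEC =====
def Spec_quad_key_to_tile_xy (quad_key : String) (out : Int × Int × Int) : Prop := out = quad_key_to_tile_xy_alt quad_key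
instance (quad_key : String) (out : Int × Int × Int) : Decidable (Spec_quad_key_to_tile_xy quad_key out) := by unfold Spec_quad_key_to_tile_xy; infer_instance

-- ===== CLAIM (what is proved, stated in full; the proofs are below) =====
def Claim_equal_quad_key_to_tile_xy : Prop := ∀ (quad_key : String), Dom_quad_key_to_tile_xy quad_key → Spec_quad_key_to_tile_xy quad_key (quad_key_to_tile_xy quad_key)

-- ===== LEMMAS AND PROOFS =====

-- Proof-only helpers: the per-character bit contributions and a paired Horner step.
def qkBX (c : Char) : Int := if c = '1' || c = '3' then 1 else 0
def qkBY (c : Char) : Int := if c = '2' || c = '3' then 1 else 0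
def qkH (s : Int × Int) (c : Char) : Int × Int := (2 * s.1 + qkBX c, 2 * s.2 + qkBY c)

-- Paired Horner fold from an arbitrary start = shifted start + fold from zero.
lemma hfold_shift (l : List Char) (s : Int × Int) :
    l.foldl qkH s = (s.1 * 2 ^ l.length + (l.foldl qkH (0,0)).1,
                     s.2 * 2 ^ l.length + (l.foldl qkH (0,0)).2) := by
  induction l generalizing s with
  | nil => simp
  | cons c t ih =>
      simp only [List.foldl_cons, List.length_cons]
      rw [ih (qkH s c), ih (qkH (0,0) c)]
      simp only [qkH, Prod.mk.injEq]
      constructor <;> ring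

-- OR-ing a fresh bit below all set bits is addition (Nat form, via Nat.bit).
lemma nat_or_two_pow (m q : Nat) : (2 ^ (m + 1) * q) ||| 2 ^ m = 2 ^ (m + 1) * q + 2 ^ m := by
  induction m generalizing q with
  | zero =>
      have := Nat.lor_bit false q true 0
      simp [Nat.bit] at this
      omega
  | succ m ih =>
      have hb := Nat.lor_bit false (2 ^ (m + 1) * q) false (2 ^ m)
      simp [Nat.bit] at hb
      calc 2 ^ (m + 2) * q ||| 2 ^ (m + 1)
          = 2 * (2 ^ (m + 1) * q) ||| 2 * 2 ^ m := by congr 1 <;> ring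
        _ = 2 * (2 ^ (m + 1) * q ||| 2 ^ m) := hb
        _ = 2 ^ (m + 2) * q + 2 ^ (m + 1) := by rw [ih]; ring

-- Int form, as used by A: x | 2^m = x + 2^m when 2^(m+1) divides the nonnegative x.
lemma bor_two_pow (x : Int) (m : Nat) (hx : 0 ≤ x) (hd : (2 ^ (m + 1) : Int) ∣ x) :
    PySem.Int.bor x (2 ^ m) = x + 2 ^ m := by
  obtain ⟨q, hq⟩ := hd
  have hq0 : 0 ≤ q := by nlinarith [pow_pos (by norm_num : (0:Int) < 2) (m+1)]
  have h1 : x = ((2 ^ (m + 1) * q.toNat : Nat) : Int) := by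
    push_cast; rw [hq, Int.toNat_of_nonneg hq0]
  have h2 : ((2:Int) ^ m) = ((2 ^ m : Nat) : Int) := by push_cast; ring
  rw [h1, h2, PySem.Int.bor_natCast, nat_or_two_pow]
  push_cast; ring

-- A's countdown loop over the last m characters, started at multiples of 2^m,
-- adds exactly the paired Horner value of those characters.
lemma loopA_eq (cs : List Char) (m : Nat) (hm : m ≤ cs.length) (x y : Int)
    (hx : 0 ≤ x) (hy : 0 ≤ y) (dx : (2 ^ m : Int) ∣ x) (dy : (2 ^ m : Int) ∣ y) :
    (PySem.List.pyRange (m : Int) 0 (-1)).foldl (qkStepA cs (cs.length : Int)) (x, y) =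
      (x + ((cs.drop (cs.length - m)).foldl qkH (0, 0)).1,
       y + ((cs.drop (cs.length - m)).foldl qkH (0, 0)).2) := by
  induction m generalizing x y with
  | zero =>
      rw [PySem.List.pyRange_neg_one_eq_nil (by norm_num)]
      simp
  | succ m ih =>
      rw [PySem.List.pyRange_neg_one_cons (by positivity)]
      simp only [List.foldl_cons]
      have hlt : cs.length - (m + 1) < cs.length := by omega
      have hidx : (cs.length : Int) - ((m + 1 : Nat) : Int) = ((cs.length - (m + 1) : Nat) : Int) := by
        omega
      have ht : PySem.List.pyGetD cs ((cs.length : Int) - ((m + 1 : Nat) : Int)) ' '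
          = cs[cs.length - (m + 1)] := by
        rw [hidx, PySem.List.pyGetD_natCast, List.getD_eq_getElem _ _ hlt]
      have hmask : (1 : Int) <<< (((m + 1 : Nat) : Int) - 1).toNat = 2 ^ m := by
        rw [Int.shiftLeft_eq']
        norm_num
      have hrest : ((m + 1 : Nat) : Int) - 1 = ((m : Nat) : Int) := by push_cast; ring
      have hdrop : cs.drop (cs.length - (m + 1)) = cs[cs.length - (m + 1)] :: cs.drop (cs.length - m) := by
        rw [List.drop_eq_getElem_cons hlt]
        have h9 : cs.length - (m + 1) + 1 = cs.length - m := by omega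
        rw [h9]
      have hlen : (cs.drop (cs.length - m)).length = m := by
        rw [List.length_drop]; omega
      have hstep : qkStepA cs (cs.length : Int) (x, y) ((m + 1 : Nat) : Int)
          = (x + qkBX cs[cs.length - (m+1)] * 2 ^ m,
             y + qkBY cs[cs.length - (m+1)] * 2 ^ m) := by
        simp only [qkStepA, ht, hmask]
        by_cases h1 : cs[cs.length - (m+1)] = '1'
        · simp [h1, qkBX, qkBY, bor_two_pow x m hx dx]
        · by_cases h2 : cs[cs.length - (m+1)] = '2'
          · simp [h2, qkBX, qkBY, bor_two_pow y m hy dy]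
          · by_cases h3 : cs[cs.length - (m+1)] = '3'
            · simp [h3, qkBX, qkBY, bor_two_pow x m hx dx, bor_two_pow y m hy dy]
            · simp [h1, h2, h3, qkBX, qkBY]
      rw [hstep, hrest]
      have dx' : (2 ^ m : Int) ∣ x + qkBX cs[cs.length - (m+1)] * 2 ^ m :=
        dvd_add (dvd_trans (pow_dvd_pow 2 (Nat.le_succ m)) dx) (Dvd.intro_left _ rfl)
      have dy' : (2 ^ m : Int) ∣ y + qkBY cs[cs.length - (m+1)] * 2 ^ m :=
        dvd_add (dvd_trans (pow_dvd_pow 2 (Nat.le_succ m)) dy) (Dvd.intro_left _ rfl)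
      have hb1 : (0:Int) ≤ qkBX cs[cs.length - (m+1)] := by
        simp [qkBX]; split_ifs <;> norm_num
      have hb2 : (0:Int) ≤ qkBY cs[cs.length - (m+1)] := by
        simp [qkBY]; split_ifs <;> norm_num
      rw [ih (by omega) _ _ (by positivity) (by positivity) dx' dy']
      rw [hdrop]
      simp only [List.foldl_cons]
      rw [hfold_shift (cs.drop (cs.length - m)) (qkH (0,0) cs[cs.length - (m+1)]), hlen]
      simp only [qkH, Prod.mk.injEq]
      constructor <;> ring

-- Component projections of the paired Horner fold.
lemma fst_foldl_qkH (l : List Char) (s : Int × Int) :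
    (l.foldl qkH s).1 = l.foldl (fun a c => 2 * a + qkBX c) s.1 := by
  induction l generalizing s with
  | nil => rfl
  | cons c t ih => simpa [qkH] using ih (qkH s c)

lemma snd_foldl_qkH (l : List Char) (s : Int × Int) :
    (l.foldl qkH s).2 = l.foldl (fun a c => 2 * a + qkBY c) s.2 := by
  induction l generalizing s with
  | nil => rfl
  | cons c t ih => simpa [qkH] using ih (qkH s c)

-- B's parse of the x bit-string (with its harmless leading '0') is the x-component
-- of the paired Horner fold; likewise for y.
lemma parse_bitsX (cs : List Char) : qkParseBin ('0' :: qkBitsX cs) = (cs.foldl qkH (0,0)).1 := by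
  rw [fst_foldl_qkH]
  simp only [qkParseBin, qkBitsX, List.foldl_cons, List.foldl_map]
  norm_num
  congr 1
  funext a c
  rcases eq_or_ne c '1' with h1 | h1 <;> rcases eq_or_ne c '3' with h3 | h3 <;>
    simp [h1, h3, qkBX]

lemma parse_bitsY (cs : List Char) : qkParseBin ('0' :: qkBitsY cs) = (cs.foldl qkH (0,0)).2 := by
  rw [snd_foldl_qkH]
  simp only [qkParseBin, qkBitsY, List.foldl_cons, List.foldl_map]
  norm_num
  congr 1
  funext a c
  rcases eq_or_ne c '2' with h2 | h2 <;> rcases eq_or_ne c '3' with h3 | h3 <;>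
    simp [h2, h3, qkBY]

-- ===== VERDICT (by name: the statement is the Claim_ definition above) =====
theorem quad_key_to_tile_xy_spec : Claim_equal_quad_key_to_tile_xy := by
  intro q _
  unfold Spec_quad_key_to_tile_xy quad_key_to_tile_xy quad_key_to_tile_xy_alt
  have h := loopA_eq q.toList q.toList.length le_rfl 0 0 le_rfl le_rfl (dvd_zero _) (dvd_zero _)
  simp only [Nat.sub_self, List.drop_zero, zero_add] at h
  simp only [PySem.Str.len_eq, h, parse_bitsX, parse_bitsY]
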